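-- pv_equiv track=rewrite | github.com/PiperLiu/ACMOI_Journey | refresh.py | _del_last_vacant
-- ===== SOURCE A (Python) =====
-- def _del_last_vacant(row_list: list):
--     last_vacant_idx = len(row_list)
--     for _, row in enumerate(row_list[::-1]):
--         if row == '':
--             last_vacant_idx -= 1
--         else:
--             break
--     row_list = row_list[:last_vacant_idx]
--     return row_list
-- ===== SOURCE B (Python) =====
-- def _del_last_vacant(row_list: list):
--     last = 0
--     for i, row in enumerate(row_list):
--         if row != '':
--             last = i + 1
--     return row_list[:last]
-- ===== Notes on version B (the rewrite author's own statement) =====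
-- stated objective: alternative
-- what changed: Replaces the reversed scan that counts trailing empties (with a break) by a single forward pass maintaining the index just past the last non-empty element, then slicing once.
import Mathlib
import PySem

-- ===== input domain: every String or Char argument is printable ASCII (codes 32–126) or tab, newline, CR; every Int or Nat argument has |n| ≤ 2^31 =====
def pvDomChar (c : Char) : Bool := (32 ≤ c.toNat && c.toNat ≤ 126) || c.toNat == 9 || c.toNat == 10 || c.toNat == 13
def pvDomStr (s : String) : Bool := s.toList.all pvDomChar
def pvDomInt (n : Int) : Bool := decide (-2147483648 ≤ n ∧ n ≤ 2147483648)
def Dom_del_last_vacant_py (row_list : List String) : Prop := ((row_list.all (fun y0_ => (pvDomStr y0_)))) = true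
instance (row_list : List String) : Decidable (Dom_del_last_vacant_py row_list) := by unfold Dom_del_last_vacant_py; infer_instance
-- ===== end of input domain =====

-- B replaces A's reversed trailing-empties countdown (with break) by one forward pass
-- keeping the index just past the last non-empty element (objective: alternative).


-- ===== PORT A =====
-- A's for-loop over row_list[::-1] with break: decrement idx while rows are '', stop at first non-empty.
def pvALoop : List String → Int → Int
  | [], idx => idx
  | r :: rs, idx => if r = "" then pvALoop rs (idx - 1) else idx

def del_last_vacant_py (row_list : List String) : List String :=
  PySem.List.slice row_list none (some (pvALoop row_list.reverse (row_list.length : Int)))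

-- ===== PORT B =====
-- B's forward loop over enumerate(row_list): last := i+1 at each non-empty row.
def pvBLoop : List (Int × String) → Int → Int
  | [], last => last
  | (i, r) :: rest, last => pvBLoop rest (if r ≠ "" then i + 1 else last)

def del_last_vacant_py_alt (row_list : List String) : List String :=
  PySem.List.slice row_list none (some (pvBLoop (PySem.List.enumerate row_list 0) 0))

-- ===== PRECONDITION & SPEC =====
def Spec_del_last_vacant_py (row_list : List String) (out : List String) : Prop := out = del_last_vacant_py_alt row_list
instance (row_list : List String) (out : List String) : Decidable (Spec_del_last_vacant_py row_list out) := by unfold Spec_del_last_vacant_py; infer_instance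

-- ===== CLAIM (what is proved, stated in full; the proofs are below) =====
def Claim_equal_del_last_vacant_py : Prop := ∀ (row_list : List String), Dom_del_last_vacant_py row_list → Spec_del_last_vacant_py row_list (del_last_vacant_py row_list)

-- ===== LEMMAS AND PROOFS =====
theorem pvBLoop_append_single (u : List (Int × String)) (i : Int) (x : String) (last : Int) :
    pvBLoop (u ++ [(i, x)]) last = if x = "" then pvBLoop u last else i + 1 := by
  induction u generalizing last with
  | nil => by_cases h : x = "" <;> simp [pvBLoop, h]
  | cons p u ih => obtain ⟨j, r⟩ := p; simp [pvBLoop, ih]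

theorem pv_loops_eq (l : List String) :
    pvALoop l.reverse (l.length : Int) = pvBLoop (PySem.List.enumerate l 0) 0 := by
  induction l using List.reverseRecOn with
  | nil => simp [pvALoop, pvBLoop, PySem.List.enumerate]
  | append_singleton xs x ih =>
    rw [PySem.List.enumerate_append]
    simp only [List.reverse_append, List.reverse_cons, List.reverse_nil, List.nil_append,
      List.cons_append, List.length_append, List.length_cons, List.length_nil,
      PySem.List.enumerate_cons, PySem.List.enumerate_nil]
    by_cases h : x = ""
    · simp only [pvALoop, if_pos h, pvBLoop_append_single]
      rw [show ((xs.length + (0 + 1) : Nat) : Int) - 1 = (xs.length : Int) by push_cast; ring]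
      exact ih
    · simp only [pvALoop, if_neg h, pvBLoop_append_single]
      push_cast; ring

-- ===== VERDICT (by name: the statement is the Claim_ definition above) =====
theorem del_last_vacant_py_spec : Claim_equal_del_last_vacant_py := by
  intro l _
  unfold Spec_del_last_vacant_py del_last_vacant_py del_last_vacant_py_alt
  rw [pv_loops_eq]
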